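-- pv_equiv track=rewrite | github.com/zefanja/bible-memorizer | src/fix_last_letters.py | mask_final_letter_of_string
-- ===== SOURCE A (Python) =====
-- def mask_final_letter_of_string(text: str) -> str:
--     """Replace the last alphabetic letter of the entire string with '_'."""
--     chars = list(text)
--     i = len(chars) - 1
--     while i >= 0 and not chars[i].isalpha():
--         i -= 1
--     if i >= 0 and chars[i].isalpha():
--         chars[i] = "_"
--     return "".join(chars)
-- ===== SOURCE B (Python) =====
-- def mask_final_letter_of_string(text: str) -> str:
--     """Replace the last alphabetic letter of the entire string with '_'."""
--     i = max((j for j, c in enumerate(text) if c.isalpha()), default=-1)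
--     if i == -1:
--         return text
--     return text[:i] + "_" + text[i + 1:]
-- ===== Notes on version B (the rewrite author's own statement) =====
-- stated objective: idiomatic
-- what changed: B replaces A's mutable char-list and backward while-loop with a single forward pass taking the maximum alphabetic index (max over enumerate with default=-1) and rebuilds the result by string slicing instead of in-place mutation plus join.
import Mathlib
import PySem

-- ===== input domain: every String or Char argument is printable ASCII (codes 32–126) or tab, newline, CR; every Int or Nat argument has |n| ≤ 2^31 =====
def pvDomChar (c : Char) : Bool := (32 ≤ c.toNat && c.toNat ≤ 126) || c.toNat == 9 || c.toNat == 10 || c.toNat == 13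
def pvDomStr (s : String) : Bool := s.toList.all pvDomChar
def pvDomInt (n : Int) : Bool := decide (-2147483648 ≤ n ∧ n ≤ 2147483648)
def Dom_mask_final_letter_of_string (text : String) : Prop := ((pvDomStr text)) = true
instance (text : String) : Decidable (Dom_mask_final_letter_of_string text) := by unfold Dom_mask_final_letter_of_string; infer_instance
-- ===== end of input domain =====

-- B replaces A's mutable char-list and backward while-loop with a forward pass taking the
-- maximum alphabetic index and rebuilds the result by slicing (objective: idiomatic).

-- ===== PORT A =====
-- while i >= 0 and not chars[i].isalpha(): i -= 1
def maskWhileA (chars : List Char) (i : Int) : Int :=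
  if h : i ≥ 0 ∧ ¬ PySem.Chars.isalpha (PySem.List.pyGetD chars i ' ') then
    maskWhileA chars (i - 1)
  else i
termination_by (i + 1).toNat
decreasing_by omega

def mask_final_letter_of_string (text : String) : String :=
  let chars := text.toList
  let i := maskWhileA chars ((chars.length : Int) - 1)
  if i ≥ 0 ∧ PySem.Chars.isalpha (PySem.List.pyGetD chars i ' ') then
    String.ofList (PySem.List.pySetD chars i '_')
  else
    String.ofList chars

-- ===== PORT B =====
def mask_final_letter_of_string_alt (text : String) : String :=
  let cs := text.toList
  let i : Int := PySem.List.maxD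
    ((PySem.List.enumerate cs).filterMap
      (fun jc => if PySem.Chars.isalpha jc.2 then some jc.1 else none)) id (-1)
  if i = -1 then text
  else
    String.ofList (PySem.List.slice cs none (some i) ++
      '_' :: PySem.List.slice cs (some (i + 1)) none)

-- ===== PRECONDITION & SPEC =====
def Spec_mask_final_letter_of_string (text : String) (out : String) : Prop := out = mask_final_letter_of_string_alt text
instance (text : String) (out : String) : Decidable (Spec_mask_final_letter_of_string text out) := by unfold Spec_mask_final_letter_of_string; infer_instance

-- ===== CLAIM (what is proved, stated in full; the proofs are below) =====
def Claim_equal_mask_final_letter_of_string : Prop := ∀ (text : String), Dom_mask_final_letter_of_string text → Spec_mask_final_letter_of_string text (mask_final_letter_of_string text)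

-- ===== LEMMAS AND PROOFS =====

-- reference value: the largest alphabetic index among positions < n, else -1
def lastAlpha (L : List Char) : Nat → Int
  | 0 => -1
  | n + 1 => if PySem.Chars.isalpha ((L[n]?.getD ' ')) then (n : Int) else lastAlpha L n

lemma maskWhileA_eq (L : List Char) (n : Nat) :
    maskWhileA L ((n : Int) - 1) = lastAlpha L n := by
  induction n with
  | zero =>
    rw [maskWhileA]
    simp [lastAlpha]
  | succ n ih =>
    rw [maskWhileA]
    have hc : ((n + 1 : Nat) : Int) - 1 = (n : Int) := by push_cast; ring
    rw [hc]
    simp only [PySem.List.pyGetD_natCast, List.getD_eq_getElem?_getD]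
    by_cases h : PySem.Chars.isalpha ((L[n]?.getD ' '))
    · simp [lastAlpha, h]
    · simp [lastAlpha, h, ih]

lemma lastAlpha_cases (L : List Char) (n : Nat) :
    lastAlpha L n = -1 ∨
      ∃ j : Nat, lastAlpha L n = (j : Int) ∧ j < n ∧
        PySem.Chars.isalpha ((L[j]?.getD ' ')) = true := by
  induction n with
  | zero => left; rfl
  | succ n ih =>
    by_cases h : PySem.Chars.isalpha ((L[n]?.getD ' '))
    · right; exact ⟨n, by simp [lastAlpha, h], by omega, h⟩
    · rcases ih with h1 | ⟨j, hj, hlt, ha⟩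
      · left; simp [lastAlpha, h, h1]
      · right; exact ⟨j, by simp [lastAlpha, h, hj], by omega, ha⟩

lemma lastAlpha_append (L : List Char) (c : Char) (n : Nat) (h : n ≤ L.length) :
    lastAlpha (L ++ [c]) n = lastAlpha L n := by
  induction n with
  | zero => rfl
  | succ n ih =>
    have hn : n < L.length := by omega
    have : ((L ++ [c])[n]?.getD ' ') = (L[n]?.getD ' ') := by
      simp [List.getElem?_append_left hn]
    simp [lastAlpha, this, ih (by omega)]

-- filtered index list of B
def filtIdx (L : List Char) : List Int :=
  (PySem.List.enumerate L).filterMap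
    (fun jc => if PySem.Chars.isalpha jc.2 then some jc.1 else none)

lemma enumerate_append_singleton (L : List Char) (c : Char) (s : Int) :
    PySem.List.enumerate (L ++ [c]) s
      = PySem.List.enumerate L s ++ [(s + L.length, c)] := by
  induction L generalizing s with
  | nil => simp [PySem.List.enumerate]
  | cons x t ih =>
    simp only [List.cons_append, PySem.List.enumerate, ih (s + 1), List.length_cons]
    have : s + 1 + (t.length : Int) = s + ((t.length + 1 : Nat) : Int) := by push_cast; ring
    rw [this]

lemma filtIdx_append (L : List Char) (c : Char) :
    filtIdx (L ++ [c]) = filtIdx L ++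
      (if PySem.Chars.isalpha c then [(L.length : Int)] else []) := by
  unfold filtIdx
  rw [enumerate_append_singleton]
  by_cases h : PySem.Chars.isalpha c <;> simp [List.filterMap_append, h]

lemma filtIdx_lt (L : List Char) : ∀ x ∈ filtIdx L, x < (L.length : Int) := by
  induction L using List.reverseRecOn with
  | nil => simp [filtIdx, PySem.List.enumerate]
  | append_singleton L c ih =>
    intro x hx
    rw [filtIdx_append] at hx
    rcases List.mem_append.mp hx with h1 | h2
    · have := ih x h1
      simp only [List.length_append, List.length_cons, List.length_nil]
      push_cast; omega
    · by_cases h : PySem.Chars.isalpha c <;> simp [h] at h2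
      subst h2
      simp only [List.length_append, List.length_cons, List.length_nil]
      push_cast; omega

lemma maxD_append_lt (xs : List Int) (m : Int) (h : ∀ x ∈ xs, x < m) :
    PySem.List.maxD (xs ++ [m]) id (-1) = m := by
  unfold PySem.List.maxD
  rcases hacc : PySem.List.max? (xs ++ [m]) id with _ | a
  · exact absurd ((PySem.List.max?_eq_none_iff _ _).mp hacc) (by simp)
  · rw [Option.getD_some]
    have hmem := PySem.List.max?_mem hacc
    have hmax := PySem.List.max?_isMax hacc m (by simp)
    simp only [id_eq] at hmax
    rcases List.mem_append.mp hmem with h1 | h2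
    · have := h a h1; omega
    · simpa using h2

lemma maxD_filtIdx (L : List Char) :
    PySem.List.maxD (filtIdx L) id (-1) = lastAlpha L L.length := by
  induction L using List.reverseRecOn with
  | nil => rfl
  | append_singleton L c ih =>
    rw [filtIdx_append]
    have hlen : (L ++ [c]).length = L.length + 1 := by simp
    rw [hlen]
    have hc : ((L ++ [c])[L.length]?.getD ' ') = c := by simp
    by_cases h : PySem.Chars.isalpha c
    · rw [if_pos h, maxD_append_lt _ _ (filtIdx_lt L)]
      conv_rhs => rw [lastAlpha]
      rw [hc, if_pos h]
    · rw [if_neg h, List.append_nil, ih]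
      conv_rhs => rw [lastAlpha]
      rw [hc, if_neg h, lastAlpha_append L c L.length (le_refl _)]

lemma pySetD_nat (l : List Char) (j : Nat) (h : j < l.length) :
    PySem.List.pySetD l (j : Int) '_' = l.set j '_' := by
  simp [PySem.List.pySetD, PySem.List.pySet?, PySem.List.pyIdx?, h]

-- ===== VERDICT (by name: the statement is the Claim_ definition above) =====
theorem mask_final_letter_of_string_spec : Claim_equal_mask_final_letter_of_string := by
  intro text _
  unfold Spec_mask_final_letter_of_string
  unfold mask_final_letter_of_string mask_final_letter_of_string_alt
  set L := text.toList with hL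
  simp only []
  have hw : maskWhileA L ((L.length : Int) - 1) = lastAlpha L L.length :=
    maskWhileA_eq L L.length
  have hb : PySem.List.maxD (filtIdx L) id (-1) = lastAlpha L L.length := maxD_filtIdx L
  rw [hw]
  rw [show ((PySem.List.enumerate L).filterMap
      (fun jc => if PySem.Chars.isalpha jc.2 then some jc.1 else none)) = filtIdx L from rfl, hb]
  rcases lastAlpha_cases L L.length with h1 | ⟨j, hj, hlt, ha⟩
  · rw [h1]
    have : ¬ ((-1 : Int) ≥ 0 ∧ PySem.Chars.isalpha (PySem.List.pyGetD L (-1) ' ')) := by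
      intro ⟨h, _⟩; omega
    simp only [this, if_false]
    simp [hL, String.ofList_toList]
  · rw [hj]
    have hGetD : PySem.List.pyGetD L (j : Int) ' ' = (L[j]?.getD ' ') := by
      simp [List.getD_eq_getElem?_getD]
    have hcond : ((j : Int) ≥ 0 ∧ PySem.Chars.isalpha (PySem.List.pyGetD L (j : Int) ' ')) := by
      constructor
      · omega
      · rw [hGetD]; exact ha
    have hne : ¬ ((j : Int) = -1) := by omega
    rw [if_pos hcond, if_neg hne]
    rw [pySetD_nat L j hlt]
    rw [PySem.List.slice_to_natCast]
    have hj1 : (j : Int) + 1 = ((j + 1 : Nat) : Int) := by push_cast; ring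
    rw [hj1, PySem.List.slice_from_natCast]
    rw [List.set_eq_take_cons_drop '_' hlt]
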